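-- pv_equiv track=rewrite | github.com/Gingertrout/ComfyUI_to_webui | kelnel_ui/ui_def.py | find_closest_preset
-- ===== SOURCE A (Python) =====
-- from math import gcd
--
-- def calculate_aspect_ratio(width, height):
--     if width is None or height is None or width <= 0 or height <= 0:
--         return "0:0"
--     try:
--         w, h = int(width), int(height)
--         common_divisor = gcd(w, h)
--         return f"{w//common_divisor}:{h//common_divisor}"
--     except (ValueError, TypeError):
--         return "Invalid input"
--
-- def strip_prefix(resolution_str, resolution_prefixes_list):
--     """Removes known prefixes from the resolution string."""
--     for prefix in resolution_prefixes_list: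
--         if resolution_str.startswith(prefix):
--             return resolution_str[len(prefix):]
--     return resolution_str # Return original if no prefix matches
--
-- def parse_resolution(resolution_str, resolution_prefixes_list):
--     if resolution_str == "custom":
--         return None, None, "Custom", "custom"
--     try:
--         cleaned_str = strip_prefix(resolution_str, resolution_prefixes_list)
--         parts = cleaned_str.split("|")
--         if len(parts) != 2: return None, None, "Invalid format", resolution_str
--         width, height = map(int, parts[0].split("x"))
--         ratio = parts[1]
--         return width, height, ratio, resolution_str
--     except ValueError:
--         return None, None, "Invalid format", resolution_str
--
-- def find_closest_preset(width, height, current_resolution_presets, resolution_prefixes_list):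
--     if width is None or height is None or width <= 0 or height <= 0:
--         return "custom"
--     try:
--         w, h = int(width), int(height)
--     except (ValueError, TypeError):
--         return "custom"
--
--     target_aspect = calculate_aspect_ratio(w, h)
--     best_match = "custom"
--     min_diff = float('inf')
--
--     for preset_str_with_prefix in current_resolution_presets:
--         if preset_str_with_prefix == "custom": continue
--         preset_width, preset_height, preset_aspect, _ = parse_resolution(preset_str_with_prefix, resolution_prefixes_list)
--         if preset_width is None: continue
--
--         if preset_width == w and preset_height == h:
--             return preset_str_with_prefix
--
--         if preset_aspect == target_aspect:
--             area_diff = abs((preset_width * preset_height) - (w * h))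
--             if area_diff < min_diff:
--                 min_diff = area_diff
--                 best_match = preset_str_with_prefix
--
--     if best_match != "custom":
--         return best_match
--     return "custom"
-- ===== SOURCE B (Python) =====
-- from math import gcd
--
-- def calculate_aspect_ratio(width, height):
--     if width is None or height is None or width <= 0 or height <= 0:
--         return "0:0"
--     try:
--         w, h = int(width), int(height)
--         common_divisor = gcd(w, h)
--         return f"{w//common_divisor}:{h//common_divisor}"
--     except (ValueError, TypeError):
--         return "Invalid input"
--
-- def strip_prefix(resolution_str, resolution_prefixes_list):
--     for prefix in resolution_prefixes_list:
--         if resolution_str.startswith(prefix):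
--             return resolution_str[len(prefix):]
--     return resolution_str
--
-- def parse_resolution(resolution_str, resolution_prefixes_list):
--     if resolution_str == "custom":
--         return None, None, "Custom", "custom"
--     try:
--         cleaned_str = strip_prefix(resolution_str, resolution_prefixes_list)
--         parts = cleaned_str.split("|")
--         if len(parts) != 2: return None, None, "Invalid format", resolution_str
--         width, height = map(int, parts[0].split("x"))
--         ratio = parts[1]
--         return width, height, ratio, resolution_str
--     except ValueError:
--         return None, None, "Invalid format", resolution_str
--
-- def find_closest_preset(width, height, current_resolution_presets, resolution_prefixes_list):
--     if width is None or height is None or width <= 0 or height <= 0: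
--         return "custom"
--     try:
--         w, h = int(width), int(height)
--     except (ValueError, TypeError):
--         return "custom"
--
--     target_aspect = calculate_aspect_ratio(w, h)
--
--     # Pass 1: parse everything once into a table (skip "custom" and unparsable entries).
--     parsed = []
--     for s in current_resolution_presets:
--         if s == "custom":
--             continue
--         pw, ph, pa, _ = parse_resolution(s, resolution_prefixes_list)
--         if pw is None:
--             continue
--         parsed.append((pw, ph, pa, s))
--
--     # Pass 2: first exact dimension match wins.
--     for pw, ph, pa, s in parsed:
--         if pw == w and ph == h:
--             return s
--
--     # Pass 3: among same-aspect presets, the one with the closest area (first on ties).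
--     matching = [t for t in parsed if t[2] == target_aspect]
--     if not matching:
--         return "custom"
--     return min(matching, key=lambda t: abs(t[0] * t[1] - w * h))[3]
-- ===== Notes on version B (the rewrite author's own statement) =====
-- stated objective: alternative
-- what changed: A's single interleaved loop (parse, exact-check, running best-area tracker with a float-inf sentinel and early return) is replaced by a staged pipeline: one parsing pass building a table, then a first-exact-match scan, then a filter by target aspect and a single min(..., key=area difference) that keeps the first minimum.
import Mathlib
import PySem

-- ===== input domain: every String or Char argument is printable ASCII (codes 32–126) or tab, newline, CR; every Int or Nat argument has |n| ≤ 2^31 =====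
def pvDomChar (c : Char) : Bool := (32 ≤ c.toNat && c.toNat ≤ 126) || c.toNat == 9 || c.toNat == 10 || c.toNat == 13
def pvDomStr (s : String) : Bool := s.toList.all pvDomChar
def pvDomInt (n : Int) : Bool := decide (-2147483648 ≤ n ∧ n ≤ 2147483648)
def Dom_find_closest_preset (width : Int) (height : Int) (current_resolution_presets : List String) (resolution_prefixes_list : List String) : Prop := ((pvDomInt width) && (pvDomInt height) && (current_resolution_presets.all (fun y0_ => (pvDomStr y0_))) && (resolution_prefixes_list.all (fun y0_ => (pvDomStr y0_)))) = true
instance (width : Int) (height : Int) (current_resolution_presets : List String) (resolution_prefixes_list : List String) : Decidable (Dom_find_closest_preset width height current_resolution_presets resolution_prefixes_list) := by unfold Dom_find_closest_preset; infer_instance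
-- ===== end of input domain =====

-- B replaces A's single interleaved loop by a staged pipeline (parse table, exact-match scan,
-- aspect filter + first-minimum selection); same cost, alternative decomposition.


-- ===== PORT A =====
-- shared module helpers (both Pythons use the same module-level calculate_aspect_ratio /
-- strip_prefix / parse_resolution; ported once, used by both ports).
-- calculate_aspect_ratio: width/height are Int here, so the None test is vacuous and the
-- int()/except branch cannot fire.
def calculate_aspect_ratio (width : Int) (height : Int) : String :=
  if width ≤ 0 || height ≤ 0 then "0:0"
  else
    let g : Int := Int.gcd width height    -- math.gcd on ints
    PySem.Int.toStr (PySem.Int.floordiv width g) ++ ":" ++ PySem.Int.toStr (PySem.Int.floordiv height g)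

def strip_prefix (resolution_str : String) (resolution_prefixes_list : List String) : String :=
  match resolution_prefixes_list with
  | [] => resolution_str
  | p :: rest =>
    if PySem.Str.startswith resolution_str p then
      PySem.Str.slice resolution_str (some (PySem.Str.len p)) none
    else strip_prefix resolution_str rest

-- parse_resolution, returning `some (width, height, ratio)` exactly when the Python returns a
-- non-None width (the None / "Custom" / "Invalid format" outcomes are all `none`: the callers
-- below only test `preset_width is None` and otherwise use width, height, ratio).
-- `width, height = map(int, parts[0].split("x"))` raises ValueError (caught) unless the split
-- has exactly two int-parsable pieces.
def parse_resolution (resolution_str : String) (resolution_prefixes_list : List String) : Option (Int × Int × String) :=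
  if resolution_str == "custom" then none
  else
    let cleaned_str := strip_prefix resolution_str resolution_prefixes_list
    match PySem.Str.split? cleaned_str "|" with   -- sep "|" ≠ "": never none
    | some [p0, p1] =>
      (match PySem.Str.split? p0 "x" with
       | some [a, b] =>
         (match PySem.Int.ofStr? a, PySem.Int.ofStr? b with
          | some w, some h => some (w, h, p1)
          | _, _ => none)
       | _ => none)
    | _ => none

-- A's for-loop with early return and the (best_match, min_diff) state; min_diff = none is float('inf').
def fcp_loop (w : Int) (h : Int) (ta : String) (pf : List String) :
    List String → String → Option Int → String
  | [], best, _ => if best != "custom" then best else "custom"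
  | p :: rest, best, md =>
    if p == "custom" then fcp_loop w h ta pf rest best md
    else
      match parse_resolution p pf with
      | none => fcp_loop w h ta pf rest best md
      | some (pw, ph, pa) =>
        if pw == w && ph == h then p
        else if pa == ta then
          let ad : Int := |pw * ph - w * h|
          if (match md with | none => true | some m => decide (ad < m)) then
            fcp_loop w h ta pf rest p (some ad)
          else fcp_loop w h ta pf rest best md
        else fcp_loop w h ta pf rest best md

def find_closest_preset (width : Int) (height : Int) (current_resolution_presets : List String) (resolution_prefixes_list : List String) : String :=
  -- width/height are Int: `is None` is vacuous, int() cannot raise, w = width, h = height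
  if width ≤ 0 || height ≤ 0 then "custom"
  else fcp_loop width height (calculate_aspect_ratio width height) resolution_prefixes_list
        current_resolution_presets "custom" none

-- ===== PORT B =====
def find_closest_preset_alt (width : Int) (height : Int) (current_resolution_presets : List String) (resolution_prefixes_list : List String) : String :=
  if width ≤ 0 || height ≤ 0 then "custom"
  else
    let target_aspect := calculate_aspect_ratio width height
    -- pass 1: parse table
    let parsed : List (Int × Int × String × String) :=
      current_resolution_presets.foldl (fun acc s =>
        if s == "custom" then acc
        else match parse_resolution s resolution_prefixes_list with
          | none => acc
          | some (pw, ph, pa) => acc ++ [(pw, ph, pa, s)]) []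
    -- pass 2: first exact dimension match
    match parsed.find? (fun t => t.1 == width && t.2.1 == height) with
    | some t => t.2.2.2
    | none =>
      -- pass 3: min over same-aspect presets by area difference (Python min keeps the first minimum)
      match PySem.List.min? (parsed.filter (fun t => t.2.2.1 == target_aspect))
              (fun t => |t.1 * t.2.1 - width * height|) with
      | none => "custom"
      | some t => t.2.2.2

-- ===== PRECONDITION & SPEC =====
def Spec_find_closest_preset (width : Int) (height : Int) (current_resolution_presets : List String) (resolution_prefixes_list : List String) (out : String) : Prop := out = find_closest_preset_alt width height current_resolution_presets resolution_prefixes_list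
instance (width : Int) (height : Int) (current_resolution_presets : List String) (resolution_prefixes_list : List String) (out : String) : Decidable (Spec_find_closest_preset width height current_resolution_presets resolution_prefixes_list out) := by unfold Spec_find_closest_preset; infer_instance

-- ===== CLAIM (what is proved, stated in full; the proofs are below) =====
def Claim_equal_find_closest_preset : Prop := ∀ (width : Int) (height : Int) (current_resolution_presets : List String) (resolution_prefixes_list : List String), Dom_find_closest_preset width height current_resolution_presets resolution_prefixes_list → Spec_find_closest_preset width height current_resolution_presets resolution_prefixes_list (find_closest_preset width height current_resolution_presets resolution_prefixes_list)

-- ===== LEMMAS AND PROOFS =====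

-- the entry a preset string contributes to B's parse table (none = skipped)
def pvEntry (pf : List String) (s : String) : Option (Int × Int × String × String) :=
  if s == "custom" then none
  else match parse_resolution s pf with
    | none => none
    | some (pw, ph, pa) => some (pw, ph, pa, s)

-- A's aspect-branch state update on (best_match, min_diff)
def pvStep (w h : Int) (st : String × Option Int) (t : Int × Int × String × String) :
    String × Option Int :=
  let ad : Int := |t.1 * t.2.1 - w * h|
  if (match st.2 with | none => true | some m => decide (ad < m)) then (t.2.2.2, some ad) else st

theorem pvEntry_custom (pf : List String) (s : String) (hc : (s == "custom") = true) :
    pvEntry pf s = none := by simp [pvEntry, hc]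

theorem pvEntry_none (pf : List String) (s : String) (hc : ¬ (s == "custom") = true)
    (hp : parse_resolution s pf = none) : pvEntry pf s = none := by
  simp [pvEntry, hc, hp]

theorem pvEntry_some (pf : List String) (s : String) (pw ph : Int) (pa : String)
    (hc : ¬ (s == "custom") = true) (hp : parse_resolution s pf = some (pw, ph, pa)) :
    pvEntry pf s = some (pw, ph, pa, s) := by
  simp [pvEntry, hc, hp]

theorem pvParsed_eq (pf : List String) :
    ∀ (l : List String) (acc : List (Int × Int × String × String)),
      l.foldl (fun acc s =>
        if s == "custom" then acc
        else match parse_resolution s pf with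
          | none => acc
          | some (pw, ph, pa) => acc ++ [(pw, ph, pa, s)]) acc
      = acc ++ l.filterMap (pvEntry pf) := by
  intro l
  induction l with
  | nil => simp
  | cons s rest ih =>
    intro acc
    rw [List.foldl_cons, List.filterMap_cons]
    have hstep : (if (s == "custom") = true then acc
        else match parse_resolution s pf with
          | none => acc
          | some (pw, ph, pa) => acc ++ [(pw, ph, pa, s)])
        = acc ++ (pvEntry pf s).toList := by
      by_cases hc : (s == "custom") = true
      · simp [pvEntry_custom pf s hc, hc]
      · rw [if_neg hc]
        cases hp : parse_resolution s pf with
        | none => simp [pvEntry_none pf s hc hp]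
        | some v =>
          obtain ⟨pw, ph, pa⟩ := v
          simp [pvEntry_some pf s pw ph pa hc hp]
    rw [hstep, ih]
    cases he : pvEntry pf s with
    | none => simp
    | some t => simp

theorem pvEntry_str_ne (pf : List String) (s : String) (t : Int × Int × String × String)
    (h : pvEntry pf s = some t) : t.2.2.2 ≠ "custom" := by
  unfold pvEntry at h
  by_cases hc : s == "custom"
  · simp [hc] at h
  · simp only [hc, Bool.false_eq_true, if_false] at h
    cases hp : parse_resolution s pf with
    | none => simp [hp] at h
    | some v =>
      obtain ⟨pw, ph, pa⟩ := v
      simp only [hp] at h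
      cases h
      simpa using hc

-- A's loop, characterised on the parse table of the remaining presets
theorem pvLoop_char (w h : Int) (ta : String) (pf : List String) :
    ∀ (l : List String) (best : String) (md : Option Int),
      fcp_loop w h ta pf l best md =
        match (l.filterMap (pvEntry pf)).find? (fun t => t.1 == w && t.2.1 == h) with
        | some t => t.2.2.2
        | none =>
          let res := ((l.filterMap (pvEntry pf)).filter (fun t => t.2.2.1 == ta)).foldl
                        (pvStep w h) (best, md)
          if res.1 != "custom" then res.1 else "custom" := by
  intro l
  induction l with
  | nil => intro best md; simp [fcp_loop]
  | cons s rest ih =>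
    intro best md
    by_cases hc : (s == "custom") = true
    · rw [List.filterMap_cons_none (pvEntry_custom pf s hc)]
      simp only [fcp_loop, hc, if_true]
      exact ih best md
    · cases hp : parse_resolution s pf with
      | none =>
        rw [List.filterMap_cons_none (pvEntry_none pf s hc hp)]
        simp only [fcp_loop, hc, Bool.false_eq_true, if_false, hp]
        exact ih best md
      | some v =>
        obtain ⟨pw, ph, pa⟩ := v
        rw [List.filterMap_cons_some (pvEntry_some pf s pw ph pa hc hp)]
        simp only [fcp_loop, hc, Bool.false_eq_true, if_false, hp]
        by_cases hex : (pw == w && ph == h) = true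
        · rw [if_pos hex, List.find?_cons_of_pos (p := fun t => t.1 == w && t.2.1 == h) (a := (pw, ph, pa, s)) hex]
        · rw [if_neg hex, List.find?_cons_of_neg (p := fun t => t.1 == w && t.2.1 == h) (a := (pw, ph, pa, s)) hex]
          by_cases ha : (pa == ta) = true
          · rw [if_pos ha, List.filter_cons_of_pos (p := fun t => t.2.2.1 == ta) (a := (pw, ph, pa, s)) ha, List.foldl_cons]
            by_cases hlt : (match md with | none => true | some m => decide (|pw * ph - w * h| < m)) = true
            · rw [if_pos hlt, ih]
              have hst : pvStep w h (best, md) (pw, ph, pa, s) = (s, some |pw * ph - w * h|) := by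
                simp [pvStep, hlt]
              rw [hst]
            · rw [if_neg hlt, ih]
              have hst : pvStep w h (best, md) (pw, ph, pa, s) = (best, md) := by
                cases md with
                | none => simp at hlt
                | some m => simp [pvStep, show ¬ (|pw * ph - w * h| < m) from by simpa using hlt]
              rw [hst]
          · rw [if_neg ha, List.filter_cons_of_neg (p := fun t => t.2.2.1 == ta) (a := (pw, ph, pa, s)) ha]
            exact ih best md

-- the tail of A's running-minimum fold is PySem.List.min? started at the head
theorem pvFold_link (w h : Int) :
    ∀ (m : List (Int × Int × String × String)) (t : Int × Int × String × String),
      ∃ r, r ∈ t :: m ∧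
        PySem.List.min? (t :: m) (fun u => |u.1 * u.2.1 - w * h|) = some r ∧
        m.foldl (pvStep w h) (t.2.2.2, some |t.1 * t.2.1 - w * h|) =
          (r.2.2.2, some |r.1 * r.2.1 - w * h|) := by
  intro m
  induction m with
  | nil => intro t; exact ⟨t, by simp, by simp [PySem.List.min?], rfl⟩
  | cons u rest ih =>
    intro t
    by_cases hlt : (|u.1 * u.2.1 - w * h| < |t.1 * t.2.1 - w * h|)
    · obtain ⟨r, hmem, hmin, hfold⟩ := ih u
      refine ⟨r, by simpa using Or.inr hmem, ?_, ?_⟩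
      · simpa [PySem.List.min?, hlt] using hmin
      · have : pvStep w h (t.2.2.2, some |t.1 * t.2.1 - w * h|) u
            = (u.2.2.2, some |u.1 * u.2.1 - w * h|) := by simp [pvStep, hlt]
        simpa [this] using hfold
    · obtain ⟨r, hmem, hmin, hfold⟩ := ih t
      refine ⟨r, ?_, ?_, ?_⟩
      · rcases (by simpa using hmem) with h1 | h2
        · simp [h1]
        · simp [h2]
      · simpa [PySem.List.min?, hlt] using hmin
      · have : pvStep w h (t.2.2.2, some |t.1 * t.2.1 - w * h|) u
            = (t.2.2.2, some |t.1 * t.2.1 - w * h|) := by simp [pvStep, hlt]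
        simpa [this] using hfold

-- ===== VERDICT (by name: the statement is the Claim_ definition above) =====
theorem find_closest_preset_spec : Claim_equal_find_closest_preset := by
  intro width height presets pf _
  unfold Spec_find_closest_preset find_closest_preset find_closest_preset_alt
  by_cases hg : (width ≤ 0 || height ≤ 0) = true
  · simp [hg]
  · simp only [hg, Bool.false_eq_true, if_false]
    rw [pvParsed_eq, List.nil_append, pvLoop_char]
    cases hfind : (presets.filterMap (pvEntry pf)).find?
        (fun t => t.1 == width && t.2.1 == height) with
    | some t => simp
    | none =>
      simp only []
      cases hm : (presets.filterMap (pvEntry pf)).filter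
          (fun t => t.2.2.1 == calculate_aspect_ratio width height) with
      | nil => simp [PySem.List.min?]
      | cons t rest =>
        obtain ⟨r, hmem, hmin, hfold⟩ := pvFold_link width height rest t
        have hstep0 : pvStep width height ("custom", none) t
            = (t.2.2.2, some |t.1 * t.2.1 - width * height|) := by simp [pvStep]
        have hrne : r.2.2.2 ≠ "custom" := by
          have : r ∈ (presets.filterMap (pvEntry pf)).filter
              (fun u => u.2.2.1 == calculate_aspect_ratio width height) := by
            rw [hm]; exact hmem
          have hrf : r ∈ presets.filterMap (pvEntry pf) := List.mem_of_mem_filter this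
          obtain ⟨s, _, hes⟩ := List.mem_filterMap.mp hrf
          exact pvEntry_str_ne pf s r hes
        simp only [List.foldl_cons, hstep0, hfold, hmin]
        simp [hrne]
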